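-- pv_equiv track=rewrite | github.com/davidus-sk/aei_standalone | bin/read_tags.py | bits_to_int
-- ===== SOURCE A (Python) =====
-- def bits_to_int(bit_array, start_bit, end_bit):
-- 	"""
-- 	Converts a slice of a boolean array (bits) into an integer.
-- 	The bits are read from left to right (MSB to LSB).
-- 	Indices are 0-based. start_bit is inclusive, end_bit is exclusive.
-- 	"""
-- 	if start_bit >= end_bit or end_bit > len(bit_array):
-- 		return 0
--
-- 	number = 0
-- 	slice_len = end_bit - start_bit
-- 	for i in range(slice_len):
-- 		# The bit to check is at index start_bit + i
-- 		if bit_array[start_bit + i]: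
-- 			# Add the corresponding power of 2
-- 			# (slice_len - 1 - i) calculates the bit's positional value
-- 			power = (slice_len - 1 - i)
-- 			number += (1 << power) # 1 << power is equivalent to 2**power
--
-- 	return number
-- ===== SOURCE B (Python) =====
-- def bits_to_int(bit_array, start_bit, end_bit):
-- 	"""Divide and conquer: split the slice in half, convert each half
-- 	recursively, and combine as left * 2**len(right) + right."""
-- 	if start_bit >= end_bit or end_bit > len(bit_array):
-- 		return 0
--
-- 	def go(lo, hi):
-- 		if hi - lo == 1:
-- 			return 1 if bit_array[lo] else 0
-- 		mid = (lo + hi) // 2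
-- 		return go(lo, mid) * 2 ** (hi - mid) + go(mid, hi)
--
-- 	return go(start_bit, end_bit)
-- ===== Notes on version B (the rewrite author's own statement) =====
-- stated objective: alternative
-- what changed: Replaces A's single left-to-right loop that adds 1 << (slice_len-1-i) per set bit with a recursive divide-and-conquer conversion: the slice is split at its midpoint, each half converted recursively, and the halves combined as left * 2**len(right) + right.
import Mathlib
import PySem

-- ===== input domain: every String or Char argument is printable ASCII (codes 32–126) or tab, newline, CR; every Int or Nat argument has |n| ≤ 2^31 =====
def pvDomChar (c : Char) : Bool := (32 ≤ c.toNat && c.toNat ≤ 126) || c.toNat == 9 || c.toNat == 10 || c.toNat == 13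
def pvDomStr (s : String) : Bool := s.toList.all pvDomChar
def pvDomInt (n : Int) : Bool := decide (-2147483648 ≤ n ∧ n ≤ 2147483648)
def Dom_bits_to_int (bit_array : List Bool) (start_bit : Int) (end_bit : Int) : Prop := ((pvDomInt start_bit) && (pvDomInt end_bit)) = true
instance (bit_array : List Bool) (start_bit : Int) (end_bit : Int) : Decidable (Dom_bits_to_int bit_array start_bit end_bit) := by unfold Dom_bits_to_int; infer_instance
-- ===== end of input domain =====

-- B replaces A's linear MSB-first power-of-two accumulation with a divide-and-conquer
-- conversion (split the slice in half, combine left * 2^len(right) + right); objective: alternative.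

-- ===== PORT A =====
def bits_to_int (bit_array : List Bool) (start_bit : Int) (end_bit : Int) : Int :=
  if start_bit ≥ end_bit ∨ end_bit > (bit_array.length : Int) then 0
  else
    let slice_len := end_bit - start_bit
    (PySem.List.pyRange 0 slice_len 1).foldl
      (fun number i =>
        if PySem.List.pyGetD bit_array (start_bit + i) false then
          number + ((1 : Int) <<< (slice_len - 1 - i).toNat)
        else number) 0

-- ===== PORT B =====
-- midpoint bounds, needed by bitsGo's termination proof
lemma pvMid_lb (lo hi : Int) (h : 2 ≤ hi - lo) : lo + 1 ≤ PySem.Int.floordiv (lo + hi) 2 := by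
  rw [PySem.Int.le_floordiv_iff_mul_le (by omega)]; omega

lemma pvMid_ub (lo hi : Int) (h : 2 ≤ hi - lo) : PySem.Int.floordiv (lo + hi) 2 < hi := by
  rw [PySem.Int.floordiv_lt_iff_lt_mul (by omega)]; omega

-- the inner recursive helper 'go'; the first branch is a totality guard only
-- (go is never reached with hi ≤ lo from bits_to_int_alt's entry guard)
def bitsGo (bit_array : List Bool) (lo hi : Int) : Int :=
  if hneg : hi - lo ≤ 0 then 0
  else if hi - lo = 1 then (if PySem.List.pyGetD bit_array lo false then 1 else 0)
  else
    let mid := PySem.Int.floordiv (lo + hi) 2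
    bitsGo bit_array lo mid * 2 ^ (hi - mid).toNat + bitsGo bit_array mid hi
termination_by (hi - lo).toNat
decreasing_by
  · have := pvMid_ub lo hi (by omega); omega
  · have := pvMid_lb lo hi (by omega); omega

def bits_to_int_alt (bit_array : List Bool) (start_bit : Int) (end_bit : Int) : Int :=
  if start_bit ≥ end_bit ∨ end_bit > (bit_array.length : Int) then 0
  else bitsGo bit_array start_bit end_bit

-- ===== PRECONDITION & SPEC =====
-- Pre_ excludes exactly the inputs where Python A raises IndexError
-- (compute path reached with start_bit below -len(bit_array)); B raises there too.
def Pre_bits_to_int (bit_array : List Bool) (start_bit : Int) (end_bit : Int) : Prop :=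
  start_bit ≥ end_bit ∨ end_bit > (bit_array.length : Int) ∨ -(bit_array.length : Int) ≤ start_bit
instance (bit_array : List Bool) (start_bit : Int) (end_bit : Int) : Decidable (Pre_bits_to_int bit_array start_bit end_bit) := by unfold Pre_bits_to_int; infer_instance

def pvWitness_bits_to_int : List Bool × Int × Int := ([true, false, true], 0, 3)

def Spec_bits_to_int (bit_array : List Bool) (start_bit : Int) (end_bit : Int) (out : Int) : Prop := out = bits_to_int_alt bit_array start_bit end_bit
instance (bit_array : List Bool) (start_bit : Int) (end_bit : Int) (out : Int) : Decidable (Spec_bits_to_int bit_array start_bit end_bit out) := by unfold Spec_bits_to_int; infer_instance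

-- ===== CLAIM (what is proved, stated in full; the proofs are below) =====
def Claim_equal_bits_to_int : Prop := ∀ (bit_array : List Bool) (start_bit : Int) (end_bit : Int), Dom_bits_to_int bit_array start_bit end_bit → Pre_bits_to_int bit_array start_bit end_bit → Spec_bits_to_int bit_array start_bit end_bit (bits_to_int bit_array start_bit end_bit)

-- ===== LEMMAS AND PROOFS =====

-- the MSB-first power sum of the slice [lo, hi) — the common characterisation of both ports
def pvSum (b : List Bool) (lo hi : Int) : Int :=
  ((List.range (hi - lo).toNat).map
    (fun (k : Nat) => if PySem.List.pyGetD b (lo + (k : Int)) false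
              then (2 : Int) ^ ((hi - lo).toNat - 1 - k) else 0)).sum

-- a foldl accumulating conditional additions is an initial value plus a sum
lemma foldl_ite_add_eq_sum {A : Type} (p : A → Bool) (h : A → Int) :
    ∀ (l : List A) (init : Int),
      l.foldl (fun a k => if p k then a + h k else a) init
        = init + (l.map (fun k => if p k then h k else 0)).sum := by
  intro l
  induction l with
  | nil => intro init; simp
  | cons x xs ih =>
    intro init
    simp only [List.foldl_cons, List.map_cons, List.sum_cons]
    split_ifs with hx <;> rw [ih] <;> ring

-- splitting the power sum at an interior point
lemma pvSum_split (b : List Bool) (lo mid hi : Int) (h1 : lo < mid) (h2 : mid < hi) :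
    pvSum b lo hi = pvSum b lo mid * 2 ^ (hi - mid).toNat + pvSum b mid hi := by
  unfold pvSum
  set n1 := (mid - lo).toNat with hn1
  set n2 := (hi - mid).toNat with hn2
  have hn : (hi - lo).toNat = n1 + n2 := by omega
  rw [hn, List.range_add, List.map_append, List.sum_append]
  congr 1
  · rw [← List.sum_map_mul_right]
    apply congrArg
    apply List.map_congr_left
    intro k hk
    have hk' : k < n1 := List.mem_range.mp hk
    have he : n1 + n2 - 1 - k = (n1 - 1 - k) + n2 := by omega
    rw [he, pow_add]
    split_ifs <;> ring
  · apply congrArg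
    rw [List.map_map]
    apply List.map_congr_left
    intro k hk
    have hk' : k < n2 := List.mem_range.mp hk
    show (if PySem.List.pyGetD b (lo + ((n1 + k : Nat) : Int)) false = true
            then (2:Int) ^ (n1 + n2 - 1 - (n1 + k)) else 0)
        = (if PySem.List.pyGetD b (mid + (k : Int)) false = true
            then (2:Int) ^ (n2 - 1 - k) else 0)
    have hmid : lo + ((n1 + k : Nat) : Int) = mid + (k : Int) := by
      push_cast; omega
    have he : n1 + n2 - 1 - (n1 + k) = n2 - 1 - k := by omega
    rw [hmid, he]

-- B's divide-and-conquer helper computes the power sum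
lemma bitsGo_eq_pvSum (b : List Bool) :
    ∀ (n : Nat) (lo hi : Int), (hi - lo).toNat = n → 0 < hi - lo →
      bitsGo b lo hi = pvSum b lo hi := by
  intro n
  induction n using Nat.strong_induction_on with
  | _ n ih =>
    intro lo hi hn hpos
    rw [bitsGo]
    rw [dif_neg (by omega)]
    by_cases h1 : hi - lo = 1
    · rw [if_pos h1]
      unfold pvSum
      have : (hi - lo).toNat = 1 := by omega
      rw [this]
      simp
    · rw [if_neg h1]
      have h2 : 2 ≤ hi - lo := by omega
      have hlb := pvMid_lb lo hi h2
      have hub := pvMid_ub lo hi h2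
      set mid := PySem.Int.floordiv (lo + hi) 2 with hm
      show bitsGo b lo mid * 2 ^ (hi - mid).toNat + bitsGo b mid hi = pvSum b lo hi
      rw [ih (mid - lo).toNat (by omega) lo mid rfl (by omega),
          ih (hi - mid).toNat (by omega) mid hi rfl (by omega)]
      exact (pvSum_split b lo mid hi (by omega) hub).symm

-- A's conditional power accumulation is the power sum too
lemma bits_to_int_eq_pvSum (b : List Bool) (lo hi : Int) (hlt : lo < hi)
    (hle : hi ≤ (b.length : Int)) :
    bits_to_int b lo hi = pvSum b lo hi := by
  unfold bits_to_int
  rw [if_neg (by omega)]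
  show (PySem.List.pyRange 0 (hi - lo) 1).foldl
      (fun number i =>
        if PySem.List.pyGetD b (lo + i) false = true then number + (1 : Int) <<< ((hi - lo) - 1 - i).toNat else number)
      (0 : Int) = pvSum b lo hi
  rw [PySem.List.pyRange_one 0 (hi - lo), List.foldl_map]
  simp only [zero_add]
  rw [foldl_ite_add_eq_sum, zero_add]
  unfold pvSum
  have hn0 : (hi - lo - 0).toNat = (hi - lo).toNat := by omega
  rw [hn0]
  apply congrArg
  apply List.map_congr_left
  intro k hk
  have hk' : k < (hi - lo).toNat := List.mem_range.mp hk
  have he : (hi - lo - 1 - (k : Int)).toNat = (hi - lo).toNat - 1 - k := by omega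
  rw [he]
  split_ifs
  · simp [Int.shiftLeft_eq]
  · rfl

-- ===== VERDICT (by name: the statement is the Claim_ definition above) =====
theorem bits_to_int_spec : Claim_equal_bits_to_int := by
  intro bit_array start_bit end_bit _ _
  unfold Spec_bits_to_int bits_to_int_alt
  by_cases hg : start_bit ≥ end_bit ∨ end_bit > (bit_array.length : Int)
  · rw [if_pos hg]
    unfold bits_to_int
    rw [if_pos hg]
  · rw [if_neg hg]
    rw [not_or, not_le, not_lt] at hg
    obtain ⟨hlt, hle⟩ := hg
    rw [bits_to_int_eq_pvSum bit_array start_bit end_bit hlt hle,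
        bitsGo_eq_pvSum bit_array (end_bit - start_bit).toNat start_bit end_bit rfl (by omega)]
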